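-- pv_equiv track=rewrite | github.com/hskim-solv/LeetCode2023- | 2223-sum-of-scores-of-built-strings/2223-sum-of-scores-of-built-strings.py | sumScores
-- ===== SOURCE A (Python) =====
-- def sumScores(s: str) -> int:
--     score = 0
--     for k in range(1,len(s)):
--         if s[-k]!=s[0]:
--             continue
--         if s[-k:]==s[:k]:
--             score += k
--             continue
--         for i in range(k):
--
--             if s[-k+i] != s[i]:
--                 score += i
--                 break
--
--     return score+len(s)
-- ===== SOURCE B (Python) =====
-- def sumScores(s: str) -> int:
--     # Z-function: z[i] = length of longest common prefix of s and s[i:], in O(n)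
--     n = len(s)
--     z = [0]
--     l = r = 0
--     for i in range(1, n):
--         zi = min(r - i, z[i - l]) if i < r else 0
--         while i + zi < n and s[zi] == s[i + zi]:
--             zi += 1
--         z.append(zi)
--         if i + zi > r:
--             l, r = i, i + zi
--     return n + sum(z)
-- ===== Notes on version B (the rewrite author's own statement) =====
-- stated objective: faster
-- what changed: Replaced A's per-suffix rescanning (first-char test, slice comparison, inner mismatch scan for every suffix) by a single left-to-right Z-function pass that reuses the previously matched [l,r) window, so each character is compared O(1) amortized times.
import Mathlib
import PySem

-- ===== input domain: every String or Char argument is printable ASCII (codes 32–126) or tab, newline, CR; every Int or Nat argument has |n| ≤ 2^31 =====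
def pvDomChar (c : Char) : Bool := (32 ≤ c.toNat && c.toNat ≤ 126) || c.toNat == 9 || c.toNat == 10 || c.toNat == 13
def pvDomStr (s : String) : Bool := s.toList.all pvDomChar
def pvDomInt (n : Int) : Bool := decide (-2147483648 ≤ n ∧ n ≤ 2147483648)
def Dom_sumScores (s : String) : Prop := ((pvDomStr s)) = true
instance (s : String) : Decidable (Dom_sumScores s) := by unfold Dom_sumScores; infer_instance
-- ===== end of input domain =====

-- B replaces A's per-suffix rescanning by a single Z-function pass.

-- ===== PORT A =====
-- inner loop 'for i in range(k): if s[-k+i] != s[i]: score += i; break' — returns the amount added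
def sumScoresInner (cs : List Char) (k i : Nat) : Int :=
  if _h : i < k then
    if PySem.List.pyGet? cs (-(k : Int) + (i : Int)) ≠ PySem.List.pyGet? cs (i : Int) then
      (i : Int)
    else
      sumScoresInner cs k (i + 1)
  else 0
termination_by k - i

def sumScores (s : String) : Int :=
  let cs := s.toList
  let n := cs.length
  let score := (PySem.List.pyRange 1 (n : Int)).foldl (fun score k =>
    if PySem.List.pyGet? cs (-k) ≠ PySem.List.pyGet? cs 0 then score
    else if PySem.List.slice cs (some (-k)) none = PySem.List.slice cs none (some k) then
      score + k
    else
      score + sumScoresInner cs k.toNat 0) 0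
  score + (n : Int)

-- ===== PORT B =====
-- 'while i + zi < n and s[zi] == s[i + zi]: zi += 1'
def zExtend (cs : List Char) (i zi : Nat) : Nat :=
  if _h : i + zi < cs.length ∧ cs[zi]? = cs[i + zi]? then zExtend cs i (zi + 1) else zi
termination_by cs.length - (i + zi)

-- 'for i in range(1, n): …' building the list z and maintaining the window [l, r)
def zLoop (cs : List Char) (n i : Nat) (z : List Nat) (l r : Nat) : List Nat :=
  if _h : i < n then
    let zi0 := if i < r then min (r - i) (z.getD (i - l) 0) else 0
    let zi := zExtend cs i zi0
    zLoop cs n (i + 1) (z ++ [zi]) (if r < i + zi then i else l) (if r < i + zi then i + zi else r)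
  else z
termination_by n - i

def sumScores_alt (s : String) : Int :=
  let cs := s.toList
  let n := cs.length
  let z := zLoop cs n 1 [0] 0 0
  ((n + z.sum : Nat) : Int)

-- ===== PRECONDITION & SPEC =====
def Spec_sumScores (s : String) (out : Int) : Prop := out = sumScores_alt s
instance (s : String) (out : Int) : Decidable (Spec_sumScores s out) := by unfold Spec_sumScores; infer_instance

-- ===== CLAIM (what is proved, stated in full; the proofs are below) =====
def Claim_equal_sumScores : Prop := ∀ (s : String), Dom_sumScores s → Spec_sumScores s (sumScores s)

-- ===== LEMMAS AND PROOFS =====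

/-- Length of the longest common prefix of two lists. -/
def lcp : List Char → List Char → Nat
  | a :: as, b :: bs => if a = b then lcp as bs + 1 else 0
  | _, _ => 0

/-- `zspec cs i` = LCP of the suffix starting at `i` with the whole list. -/
def zspec (cs : List Char) (i : Nat) : Nat := lcp (cs.drop i) cs

lemma lcp_nil_left (b : List Char) : lcp [] b = 0 := by cases b <;> rfl

lemma lcp_le_left : ∀ a b : List Char, lcp a b ≤ a.length := by
  intro a
  induction a with
  | nil => intro b; cases b <;> simp [lcp]
  | cons x as ih =>
    intro b
    cases b with
    | nil => simp [lcp]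
    | cons y bs =>
      by_cases h : x = y
      · simp only [lcp, if_pos h, List.length_cons]
        have := ih bs; omega
      · simp [lcp, h]

lemma lcp_take : ∀ a b : List Char, a.take (lcp a b) = b.take (lcp a b) := by
  intro a
  induction a with
  | nil => intro b; cases b <;> simp [lcp]
  | cons x as ih =>
    intro b
    cases b with
    | nil => simp [lcp]
    | cons y bs =>
      by_cases h : x = y
      · simp only [lcp, if_pos h, List.take_succ_cons]
        rw [h, ih bs]
      · simp [lcp, h]

lemma lcp_getElem?_ne : ∀ a b : List Char, lcp a b < a.length → lcp a b < b.length →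
    a[lcp a b]? ≠ b[lcp a b]? := by
  intro a
  induction a with
  | nil => intro b h _; simp at h
  | cons x as ih =>
    intro b ha hb
    cases b with
    | nil => simp at hb
    | cons y bs =>
      by_cases h : x = y
      · simp only [lcp, if_pos h, List.length_cons] at ha hb ⊢
        simpa using ih bs (by omega) (by omega)
      · simp only [lcp, if_neg h]
        simpa using h

lemma lcp_eq_zero_of_ne (a b : List Char)
    (h : ∀ x y, a[0]? = some x → b[0]? = some y → x ≠ y) : lcp a b = 0 := by
  cases a with
  | nil => exact lcp_nil_left b
  | cons x as =>
    cases b with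
    | nil => rfl
    | cons y bs =>
      have hxy := h x y (by simp) (by simp)
      simp [lcp, hxy]

lemma lcp_split : ∀ (j : Nat) (a b : List Char), j ≤ a.length → j ≤ b.length →
    a.take j = b.take j → lcp a b = j + lcp (a.drop j) (b.drop j) := by
  intro j
  induction j with
  | zero => intro a b _ _ _; simp
  | succ j ih =>
    intro a b ha hb ht
    cases a with
    | nil => simp at ha
    | cons x as =>
      cases b with
      | nil => simp at hb
      | cons y bs =>
        simp only [List.take_succ_cons, List.cons.injEq] at ht
        obtain ⟨hxy, hts⟩ := ht
        simp only [lcp, if_pos hxy, List.drop_succ_cons]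
        rw [ih as bs (by simpa using ha) (by simpa using hb) hts]
        omega

lemma take_eq_of_le {x y : List Char} {p t : Nat} (h : x.take p = y.take p) (ht : t ≤ p) :
    x.take t = y.take t := by
  have h2 := congrArg (List.take t) h
  simpa [List.take_take, Nat.min_eq_left ht] using h2

lemma getElem?_eq_of_take_eq {x y : List Char} {p m : Nat} (h : x.take p = y.take p)
    (hm : m < p) : x[m]? = y[m]? := by
  have h2 := congrArg (fun l : List Char => l[m]?) h
  simpa [List.getElem?_take, hm] using h2

lemma take_drop_eq {x y : List Char} (p d t : Nat) (h : x.take p = y.take p)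
    (hdt : d + t ≤ p) : (x.drop d).take t = (y.drop d).take t := by
  have h2 : x.take (d + t) = y.take (d + t) := take_eq_of_le h hdt
  have hz : ∀ z : List Char, (z.drop d).take t = (z.take (d + t)).drop d := by
    intro z
    rw [List.drop_take]
    congr 1
    omega
  rw [hz x, hz y, h2]

lemma zspec_le (cs : List Char) (i : Nat) : zspec cs i ≤ cs.length - i := by
  have := lcp_le_left (cs.drop i) cs
  simpa [zspec, List.length_drop] using this

lemma zExtend_eq (cs : List Char) (i : Nat) :
    ∀ (d zi : Nat), cs.length - (i + zi) ≤ d →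
      zExtend cs i zi = zi + lcp (cs.drop (i + zi)) (cs.drop zi) := by
  intro d
  induction d with
  | zero =>
    intro zi hd
    rw [zExtend, dif_neg (by omega)]
    rw [List.drop_eq_nil_of_le (by omega : cs.length ≤ i + zi), lcp_nil_left]
    omega
  | succ d ih =>
    intro zi hd
    rw [zExtend]
    by_cases h : i + zi < cs.length ∧ cs[zi]? = cs[i + zi]?
    · rw [dif_pos h]
      obtain ⟨hlt, heq⟩ := h
      have hzi : zi < cs.length := by omega
      rw [ih (zi + 1) (by omega)]
      have e1 : i + (zi + 1) = i + zi + 1 := by omega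
      rw [e1]
      have h1 : cs.drop (i + zi) = cs[i + zi] :: cs.drop (i + zi + 1) :=
        List.drop_eq_getElem_cons hlt
      have h2 : cs.drop zi = cs[zi] :: cs.drop (zi + 1) := List.drop_eq_getElem_cons hzi
      have hx : cs[i + zi] = cs[zi] := by
        rw [List.getElem?_eq_getElem hlt, List.getElem?_eq_getElem hzi] at heq
        exact (Option.some_inj.mp heq).symm
      rw [h1, h2]
      simp only [lcp, if_pos hx]
      omega
    · rw [dif_neg h]
      by_cases hlt : i + zi < cs.length
      · have heq : cs[zi]? ≠ cs[i + zi]? := fun hc => h ⟨hlt, hc⟩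
        have hzi : zi < cs.length := by omega
        have h1 : cs.drop (i + zi) = cs[i + zi] :: cs.drop (i + zi + 1) :=
          List.drop_eq_getElem_cons hlt
        have h2 : cs.drop zi = cs[zi] :: cs.drop (zi + 1) := List.drop_eq_getElem_cons hzi
        have hx : cs[i + zi] ≠ cs[zi] := by
          intro hc
          apply heq
          rw [List.getElem?_eq_getElem hlt, List.getElem?_eq_getElem hzi, hc]
        rw [h1, h2]
        simp [lcp, hx]
      · rw [List.drop_eq_nil_of_le (by omega : cs.length ≤ i + zi), lcp_nil_left]
        omega

lemma zExtend_correct (cs : List Char) (i zi : Nat) (hzi : zi ≤ cs.length - i)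
    (ht : (cs.drop i).take zi = cs.take zi) : zExtend cs i zi = zspec cs i := by
  rw [zExtend_eq cs i (cs.length - (i + zi)) zi (le_refl _)]
  have hsplit := lcp_split zi (cs.drop i) cs
    (by rw [List.length_drop]; omega)
    (by omega)
    ht
  rw [zspec, hsplit]
  congr 1
  rw [List.drop_drop]

lemma lcp_prefix : ∀ (cs : List Char) (k : Nat), k ≤ cs.length → lcp (cs.take k) cs = k := by
  intro cs
  induction cs with
  | nil => intro k hk; simp at hk; simp [hk, lcp]
  | cons c t ih =>
    intro k hk
    cases k with
    | zero => simp [lcp_nil_left]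
    | succ k =>
      have h := ih k (by simpa using hk)
      simp [lcp, h]

-- branch 2 of A: the whole suffix equals the prefix
lemma zspec_of_eq_take (cs : List Char) (k : Nat) (hk : k ≤ cs.length)
    (heq : cs.drop (cs.length - k) = cs.take k) : zspec cs (cs.length - k) = k := by
  rw [zspec, heq, lcp_prefix cs k hk]

-- branch 1 of A: first characters differ
lemma zspec_zero_of_head_ne (cs : List Char) (m : Nat) (_hm : m < cs.length)
    (hne : cs[m]? ≠ cs[0]?) : zspec cs m = 0 := by
  apply lcp_eq_zero_of_ne
  intro x y hx hy hxy
  apply hne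
  have h0 : (cs.drop m)[0]? = cs[m]? := by
    simp
  rw [← h0, hx, hy, hxy]

lemma zspec_lt_of_ne (cs : List Char) (k : Nat) (hk : k ≤ cs.length)
    (hne : cs.drop (cs.length - k) ≠ cs.take k) : zspec cs (cs.length - k) < k := by
  have hlen : (cs.drop (cs.length - k)).length = k := by rw [List.length_drop]; omega
  have hle : zspec cs (cs.length - k) ≤ k := by
    have := lcp_le_left (cs.drop (cs.length - k)) cs
    rw [hlen] at this
    exact this
  rcases Nat.lt_or_ge (zspec cs (cs.length - k)) k with h | h
  · exact h
  · exfalso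
    have heq : lcp (cs.drop (cs.length - k)) cs = k := by
      have e : lcp (cs.drop (cs.length - k)) cs = zspec cs (cs.length - k) := rfl
      omega
    have ht := lcp_take (cs.drop (cs.length - k)) cs
    rw [heq, List.take_of_length_le (by omega)] at ht
    exact hne ht

-- branch 3 of A, at the mismatch position itself
lemma sumScoresInner_at (cs : List Char) (k : Nat) (hk : k ≤ cs.length)
    (hL : zspec cs (cs.length - k) < k) :
    sumScoresInner cs k (zspec cs (cs.length - k)) = (zspec cs (cs.length - k) : Int) := by
  have hlen : (cs.drop (cs.length - k)).length = k := by rw [List.length_drop]; omega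
  have e : lcp (cs.drop (cs.length - k)) cs = zspec cs (cs.length - k) := rfl
  rw [sumScoresInner, dif_pos hL]
  have hneg : (-(k : Int) + ((zspec cs (cs.length - k) : Nat) : Int)) =
      -(((k - zspec cs (cs.length - k) : Nat) : Int)) := by omega
  rw [hneg, PySem.List.pyGet?_neg_natCast cs _ (by omega) (by omega),
    PySem.List.pyGet?_natCast]
  have hidx : cs.length - (k - zspec cs (cs.length - k)) =
      (cs.length - k) + zspec cs (cs.length - k) := by omega
  rw [hidx]
  have hne : cs[(cs.length - k) + zspec cs (cs.length - k)]? ≠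
      cs[zspec cs (cs.length - k)]? := by
    have h2 := lcp_getElem?_ne (cs.drop (cs.length - k)) cs
      (by rw [hlen]; exact hL) (by rw [e]; omega)
    rw [e] at h2
    rw [(List.getElem?_drop :
      (cs.drop (cs.length - k))[zspec cs (cs.length - k)]? =
        cs[(cs.length - k) + zspec cs (cs.length - k)]?)] at h2
    exact h2
  rw [if_pos hne]

-- branch 3 of A: the inner mismatch scan computes exactly the LCP
lemma sumScoresInner_correct (cs : List Char) (k : Nat) (hk : k ≤ cs.length)
    (hL : zspec cs (cs.length - k) < k) :
    ∀ (d i : Nat), zspec cs (cs.length - k) - i ≤ d → i ≤ zspec cs (cs.length - k) →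
      sumScoresInner cs k i = (zspec cs (cs.length - k) : Int) := by
  intro d
  induction d with
  | zero =>
    intro i hd hi
    obtain rfl : i = zspec cs (cs.length - k) := by omega
    exact sumScoresInner_at cs k hk hL
  | succ d ih =>
    intro i hd hi
    rcases Nat.eq_or_lt_of_le hi with heqi | hlt
    · obtain rfl : i = zspec cs (cs.length - k) := heqi
      exact sumScoresInner_at cs k hk hL
    · rw [sumScoresInner, dif_pos (by omega)]
      have hneg : (-(k : Int) + (i : Int)) = -(((k - i : Nat) : Int)) := by omega
      rw [hneg, PySem.List.pyGet?_neg_natCast cs (k - i) (by omega) (by omega),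
        PySem.List.pyGet?_natCast]
      have hidx : cs.length - (k - i) = (cs.length - k) + i := by omega
      rw [hidx]
      have heq : cs[(cs.length - k) + i]? = cs[i]? := by
        have h1 : (cs.drop (cs.length - k))[i]? = cs[(cs.length - k) + i]? :=
          List.getElem?_drop
        have h2 : (cs.drop (cs.length - k))[i]? = cs[i]? :=
          getElem?_eq_of_take_eq (lcp_take (cs.drop (cs.length - k)) cs) hlt
        rw [← h1, h2]
      rw [if_neg (not_not_intro heq)]
      exact ih (i + 1) (by omega) (by omega)

lemma zLoop_spec (cs : List Char) :
    ∀ (d i : Nat) (z : List Nat) (l r : Nat),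
      cs.length - i ≤ d → 1 ≤ i → z.length = i →
      (∀ j, 1 ≤ j → j < i → z.getD j 0 = zspec cs j) →
      (r ≤ i ∨ (1 ≤ l ∧ l < i ∧ r = l + zspec cs l ∧ r ≤ cs.length)) →
      zLoop cs cs.length i z l r = z ++ (List.range' i (cs.length - i)).map (zspec cs) := by
  intro d
  induction d with
  | zero =>
    intro i z l r hd _ _ _ _
    rw [zLoop, dif_neg (by omega)]
    rw [(by omega : cs.length - i = 0)]
    simp
  | succ d ih =>
    intro i z l r hd hi1 hzl hentries hwin
    by_cases hin : i < cs.length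
    · rw [zLoop, dif_pos hin]
      have hz : zExtend cs i (if i < r then min (r - i) (z.getD (i - l) 0) else 0) =
          zspec cs i := by
        by_cases hir : i < r
        · rw [if_pos hir]
          have hwin' : 1 ≤ l ∧ l < i ∧ r = l + zspec cs l ∧ r ≤ cs.length := by
            rcases hwin with h | h
            · omega
            · exact h
          obtain ⟨hl1, hli, hr, hrn⟩ := hwin'
          have hent : z.getD (i - l) 0 = zspec cs (i - l) :=
            hentries (i - l) (by omega) (by omega)
          rw [hent]
          have hm1 : min (r - i) (zspec cs (i - l)) ≤ r - i := Nat.min_le_left _ _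
          have hm2 : min (r - i) (zspec cs (i - l)) ≤ zspec cs (i - l) := Nat.min_le_right _ _
          apply zExtend_correct cs i _ (by omega)
          have h1 : (cs.drop l).take (zspec cs l) = cs.take (zspec cs l) :=
            lcp_take (cs.drop l) cs
          have step1 : cs.drop i = (cs.drop l).drop (i - l) := by
            rw [List.drop_drop]
            congr 1
            omega
          have step2 : ((cs.drop l).drop (i - l)).take (min (r - i) (zspec cs (i - l))) =
              (cs.drop (i - l)).take (min (r - i) (zspec cs (i - l))) :=
            take_drop_eq (zspec cs l) (i - l) _ h1 (by omega)
          have step3 : (cs.drop (i - l)).take (min (r - i) (zspec cs (i - l))) =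
              cs.take (min (r - i) (zspec cs (i - l))) :=
            take_eq_of_le (lcp_take (cs.drop (i - l)) cs) hm2
          rw [step1, step2, step3]
        · rw [if_neg hir]
          exact zExtend_correct cs i 0 (by omega) (by simp)
      simp only [hz]
      rw [ih (i + 1) (z ++ [zspec cs i])
        (if r < i + zspec cs i then i else l) (if r < i + zspec cs i then i + zspec cs i else r)
        (by omega) (by omega) (by simp [hzl]) ?_ ?_]
      · rw [(by omega : cs.length - i = (cs.length - (i + 1)) + 1), List.range'_succ]
        simp
      · intro j hj1 hji
        by_cases hj : j < i
        · rw [List.getD_append _ _ _ _ (by omega)]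
          exact hentries j hj1 hj
        · obtain rfl : j = i := by omega
          rw [List.getD_append_right _ _ _ _ (by omega)]
          simp [hzl]
      · by_cases hnew : r < i + zspec cs i
        · rw [if_pos hnew, if_pos hnew]
          right
          refine ⟨by omega, by omega, rfl, ?_⟩
          have := zspec_le cs i
          omega
        · rw [if_neg hnew, if_neg hnew]
          rcases hwin with h | h
          · left; omega
          · right
            exact ⟨h.1, by omega, h.2.2.1, h.2.2.2⟩
    · rw [zLoop, dif_neg hin]
      rw [(by omega : cs.length - i = 0)]
      simp

-- list-level sum reflection: Σ_{t<m} g (m-1-t) = Σ_{t<m} g t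
lemma sum_map_range_reflect (g : Nat → Int) :
    ∀ m : Nat, ((List.range m).map (fun t => g (m - 1 - t))).sum =
      ((List.range m).map g).sum := by
  intro m
  induction m with
  | zero => simp
  | succ m ih =>
    conv_lhs => rw [List.range_succ_eq_map]
    conv_rhs => rw [List.range_succ]
    simp only [List.map_cons, List.map_map, List.sum_cons, List.map_append, List.sum_append,
      List.map_nil, List.sum_nil]
    have hfun : ((fun t => g (m + 1 - 1 - t)) ∘ (fun t => t + 1)) = (fun t => g (m - 1 - t)) := by
      funext t
      simp only [Function.comp]
      congr 1
      omega
    rw [hfun, ih, (by omega : m + 1 - 1 - 0 = m)]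
    omega

-- A evaluates to Σ_{t<n-1} zspec (n-1-t) + n
lemma sumScores_eval (s : String) :
    sumScores s = ((List.range (s.toList.length - 1)).map
      (fun t => (zspec s.toList (s.toList.length - 1 - t) : Int))).sum +
      (s.toList.length : Int) := by
  simp only [sumScores]
  generalize s.toList = cs
  congr 1
  rw [PySem.List.pyRange_one, (by omega : ((cs.length : Int) - 1).toNat = cs.length - 1),
    List.foldl_map]
  rw [PySem.List.foldl_congr_mem (List.range (cs.length - 1)) _
    (fun acc t => acc + (zspec cs (cs.length - 1 - t) : Int)) 0 ?_]
  · rw [PySem.List.foldl_add]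
    simp
  · intro acc t ht
    simp only [List.mem_range] at ht
    show _ = acc + ((zspec cs (cs.length - 1 - t) : Nat) : Int)
    have e1 : -((1 : Int) + (t : Int)) = -(((1 + t : Nat) : Int)) := by omega
    have h1k : ((1 : Int) + (t : Int)) = (((1 + t : Nat)) : Int) := by omega
    rw [e1, h1k, PySem.List.pyGet?_neg_natCast cs (1 + t) (by omega) (by omega),
      PySem.List.slice_from_neg_natCast cs (1 + t) (by omega),
      PySem.List.slice_to_natCast cs (1 + t),
      (by simpa using PySem.List.pyGet?_natCast cs 0 : PySem.List.pyGet? cs 0 = cs[0]?),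
      Int.toNat_natCast,
      (by omega : cs.length - (1 + t) = cs.length - 1 - t)]
    by_cases hb1 : cs[cs.length - 1 - t]? ≠ cs[0]?
    · rw [if_pos hb1,
        zspec_zero_of_head_ne cs (cs.length - 1 - t) (by omega) hb1]
      simp
    · rw [if_neg hb1]
      by_cases hb2 : cs.drop (cs.length - 1 - t) = cs.take (1 + t)
      · rw [if_pos hb2]
        have h2 := zspec_of_eq_take cs (1 + t) (by omega)
          (by rw [(by omega : cs.length - (1 + t) = cs.length - 1 - t)]; exact hb2)
        rw [(by omega : cs.length - (1 + t) = cs.length - 1 - t)] at h2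
        rw [h2]
      · rw [if_neg hb2]
        have hL := zspec_lt_of_ne cs (1 + t) (by omega)
          (by rw [(by omega : cs.length - (1 + t) = cs.length - 1 - t)]; exact hb2)
        have hI := sumScoresInner_correct cs (1 + t) (by omega) hL
          (zspec cs (cs.length - (1 + t))) 0 (by omega) (by omega)
        rw [(by omega : cs.length - (1 + t) = cs.length - 1 - t)] at hI hL
        rw [hI]

-- B evaluates to Σ_{t<n-1} zspec (1+t) + n
lemma sumScores_alt_eval (s : String) :
    sumScores_alt s = ((List.range (s.toList.length - 1)).map
      (fun t => (zspec s.toList (1 + t) : Int))).sum + (s.toList.length : Int) := by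
  simp only [sumScores_alt]
  generalize s.toList = cs
  rw [zLoop_spec cs cs.length 1 [0] 0 0 (by omega) (by omega) (by simp)
    (fun j hj1 hj2 => absurd hj2 (by omega)) (Or.inl (by omega))]
  rw [List.range'_eq_map_range, List.map_map]
  push_cast [Nat.cast_list_sum]
  simp only [List.map_append, List.map_map, List.map_cons, List.map_nil, List.sum_append,
    List.sum_cons, List.sum_nil, Function.comp_def]
  omega

-- ===== VERDICT (by name: the statement is the Claim_ definition above) =====
theorem sumScores_spec : Claim_equal_sumScores := by
  unfold Claim_equal_sumScores
  intro s _
  unfold Spec_sumScores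
  rw [sumScores_eval, sumScores_alt_eval]
  congr 1
  calc ((List.range (s.toList.length - 1)).map
        (fun t => (zspec s.toList (s.toList.length - 1 - t) : Int))).sum
      = ((List.range (s.toList.length - 1)).map
        (fun t => (zspec s.toList (1 + (s.toList.length - 1 - 1 - t)) : Int))).sum := by
        apply congrArg
        apply List.map_congr_left
        intro t ht
        simp only [List.mem_range] at ht
        congr 2
        omega
    _ = ((List.range (s.toList.length - 1)).map
        (fun t => (zspec s.toList (1 + t) : Int))).sum :=
        sum_map_range_reflect (fun j => (zspec s.toList (1 + j) : Int)) (s.toList.length - 1)
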